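-- pv_equiv track=rewrite | github.com/rechoagency/echomind-backend | workers/weekly_report_generator.py | _get_top_opportunities_by_tier
-- ===== SOURCE A (Python) =====
-- from typing import Dict, List, Any, Optional
--
-- def _get_top_opportunities_by_tier(opportunities: List[Dict]) -> Dict[str, List[Dict]]:
--     """Organize opportunities by priority tier"""
--     result = {
--         "Platinum": [],
--         "Gold": [],
--         "Silver": []
--     }
--
--     for opp in opportunities:
--         tier = opp.get("priority_tier", "Silver")
--         if tier in result:
--             result[tier].append(opp)
--
--     # Limit to top 5 per tier
--     for tier in result:
--         result[tier] = result[tier][:5]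
--
--     return result
-- ===== SOURCE B (Python) =====
-- def _get_top_opportunities_by_tier(opportunities):
--     """Organize opportunities by priority tier: three independent filter scans, top 5 each."""
--     return {
--         tier: [opp for opp in opportunities
--                if opp.get("priority_tier", "Silver") == tier][:5]
--         for tier in ("Platinum", "Gold", "Silver")
--     }
-- ===== Notes on version B (the rewrite author's own statement) =====
-- stated objective: simpler
-- what changed: Replaces the mutate-a-dict dispatch pass plus a second truncation pass with a single dict comprehension that, for each of the three fixed tiers, filters the list for opportunities whose effective tier (missing key defaults to Silver) equals it and slices the first 5.
import Mathlib
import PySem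

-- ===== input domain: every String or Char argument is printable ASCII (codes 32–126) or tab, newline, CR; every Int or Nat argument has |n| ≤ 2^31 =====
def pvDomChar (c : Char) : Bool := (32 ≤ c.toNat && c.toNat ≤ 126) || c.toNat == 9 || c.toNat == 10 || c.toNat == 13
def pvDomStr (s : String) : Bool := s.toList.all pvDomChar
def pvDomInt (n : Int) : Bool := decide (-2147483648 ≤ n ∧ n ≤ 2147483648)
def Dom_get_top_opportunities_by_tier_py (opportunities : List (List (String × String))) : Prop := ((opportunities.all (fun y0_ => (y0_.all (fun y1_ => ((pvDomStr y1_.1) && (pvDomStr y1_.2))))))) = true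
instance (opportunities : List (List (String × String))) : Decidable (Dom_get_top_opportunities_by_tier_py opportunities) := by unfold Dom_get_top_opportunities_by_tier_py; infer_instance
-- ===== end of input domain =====

-- B replaces A's dispatch-and-append pass over a mutable dict (plus a second truncation pass)
-- with one comprehension: per fixed tier, filter the list by effective tier and take the first 5 (simpler).


-- ===== PORT A =====
-- tier = opp.get("priority_tier", "Silver")
def pvEffTier (opp : List (String × String)) : String :=
  (PySem.Dict.mk opp).getD "priority_tier" "Silver"

def get_top_opportunities_by_tier_py (opportunities : List (List (String × String))) : List (String × List (List (String × String))) :=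
  let result : PySem.Dict String (List (List (String × String))) :=
    PySem.Dict.mk [("Platinum", []), ("Gold", []), ("Silver", [])]
  -- for opp in opportunities: tier = opp.get(...); if tier in result: result[tier].append(opp)
  let result := opportunities.foldl (fun r opp =>
    let tier := pvEffTier opp
    if r.contains tier then r.modify tier [] (fun xs => xs ++ [opp]) else r) result
  -- for tier in result: result[tier] = result[tier][:5]
  let result := result.keys.foldl (fun r tier =>
    r.insert tier (PySem.List.slice (r.getD tier []) none (some 5))) result
  result.items

-- ===== PORT B =====
def get_top_opportunities_by_tier_py_alt (opportunities : List (List (String × String))) : List (String × List (List (String × String))) :=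
  ["Platinum", "Gold", "Silver"].map (fun tier =>
    (tier, PySem.List.slice
      (opportunities.filter (fun opp => pvEffTier opp == tier)) none (some 5)))

-- ===== PRECONDITION & SPEC =====
def Spec_get_top_opportunities_by_tier_py (opportunities : List (List (String × String))) (out : List (String × List (List (String × String)))) : Prop := out = get_top_opportunities_by_tier_py_alt opportunities
instance (opportunities : List (List (String × String))) (out : List (String × List (List (String × String)))) : Decidable (Spec_get_top_opportunities_by_tier_py opportunities out) := by unfold Spec_get_top_opportunities_by_tier_py; infer_instance

-- ===== CLAIM (what is proved, stated in full; the proofs are below) =====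
def Claim_equal_get_top_opportunities_by_tier_py : Prop := ∀ (opportunities : List (List (String × String))), Dom_get_top_opportunities_by_tier_py opportunities → Spec_get_top_opportunities_by_tier_py opportunities (get_top_opportunities_by_tier_py opportunities)

-- ===== LEMMAS AND PROOFS =====

-- The dispatch loop over the fixed three-key dict appends each opp to its tier's bucket:
-- buckets end up as the per-tier filters of the input, in order.
lemma pvLoopA (l : List (List (String × String))) (p g s : List (List (String × String))) :
    l.foldl (fun r opp =>
        if r.contains (pvEffTier opp) then r.modify (pvEffTier opp) [] (fun xs => xs ++ [opp]) else r)
      (PySem.Dict.mk [("Platinum", p), ("Gold", g), ("Silver", s)]) =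
    PySem.Dict.mk [("Platinum", p ++ l.filter (fun o => pvEffTier o == "Platinum")),
                   ("Gold", g ++ l.filter (fun o => pvEffTier o == "Gold")),
                   ("Silver", s ++ l.filter (fun o => pvEffTier o == "Silver"))] := by
  induction l generalizing p g s with
  | nil => simp
  | cons o l ih =>
    simp only [List.foldl_cons, List.filter_cons]
    by_cases hp : pvEffTier o = "Platinum"
    · have hacc : (if (PySem.Dict.mk [("Platinum", p), ("Gold", g), ("Silver", s)]).contains (pvEffTier o) then
          (PySem.Dict.mk [("Platinum", p), ("Gold", g), ("Silver", s)]).modify (pvEffTier o) [] (fun xs => xs ++ [o])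
          else PySem.Dict.mk [("Platinum", p), ("Gold", g), ("Silver", s)]) =
          PySem.Dict.mk [("Platinum", p ++ [o]), ("Gold", g), ("Silver", s)] := by
        simp [hp, PySem.Dict.contains, PySem.Dict.modify, PySem.Dict.insert,
              PySem.Dict.getD, PySem.Dict.get?]
      rw [hacc, ih]
      simp [hp]
    · by_cases hg : pvEffTier o = "Gold"
      · have hacc : (if (PySem.Dict.mk [("Platinum", p), ("Gold", g), ("Silver", s)]).contains (pvEffTier o) then
            (PySem.Dict.mk [("Platinum", p), ("Gold", g), ("Silver", s)]).modify (pvEffTier o) [] (fun xs => xs ++ [o])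
            else PySem.Dict.mk [("Platinum", p), ("Gold", g), ("Silver", s)]) =
            PySem.Dict.mk [("Platinum", p), ("Gold", g ++ [o]), ("Silver", s)] := by
          simp [hg, PySem.Dict.contains, PySem.Dict.modify, PySem.Dict.insert,
                PySem.Dict.getD, PySem.Dict.get?]
        rw [hacc, ih]
        simp [hg]
      · by_cases hs : pvEffTier o = "Silver"
        · have hacc : (if (PySem.Dict.mk [("Platinum", p), ("Gold", g), ("Silver", s)]).contains (pvEffTier o) then
              (PySem.Dict.mk [("Platinum", p), ("Gold", g), ("Silver", s)]).modify (pvEffTier o) [] (fun xs => xs ++ [o])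
              else PySem.Dict.mk [("Platinum", p), ("Gold", g), ("Silver", s)]) =
              PySem.Dict.mk [("Platinum", p), ("Gold", g), ("Silver", s ++ [o])] := by
            simp [hs, PySem.Dict.contains, PySem.Dict.modify, PySem.Dict.insert,
                  PySem.Dict.getD, PySem.Dict.get?]
          rw [hacc, ih]
          simp [hs]
        · have hacc : (if (PySem.Dict.mk [("Platinum", p), ("Gold", g), ("Silver", s)]).contains (pvEffTier o) then
              (PySem.Dict.mk [("Platinum", p), ("Gold", g), ("Silver", s)]).modify (pvEffTier o) [] (fun xs => xs ++ [o])
              else PySem.Dict.mk [("Platinum", p), ("Gold", g), ("Silver", s)]) =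
              PySem.Dict.mk [("Platinum", p), ("Gold", g), ("Silver", s)] := by
            have hc : (PySem.Dict.mk [("Platinum", p), ("Gold", g), ("Silver", s)]).contains
                (pvEffTier o) = false := by
              simp [PySem.Dict.contains]
              exact ⟨fun h => hp h.symm, fun h => hg h.symm, fun h => hs h.symm⟩
            simp [hc]
          rw [hacc, ih]
          simp [hp, hg, hs]

-- ===== VERDICT (by name: the statement is the Claim_ definition above) =====
theorem get_top_opportunities_by_tier_py_spec : Claim_equal_get_top_opportunities_by_tier_py := by
  intro opps _
  show get_top_opportunities_by_tier_py opps = get_top_opportunities_by_tier_py_alt opps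
  show (((opps.foldl (fun r opp =>
      if r.contains (pvEffTier opp) then r.modify (pvEffTier opp) [] (fun xs => xs ++ [opp]) else r)
      (PySem.Dict.mk [("Platinum", []), ("Gold", []), ("Silver", [])])).keys.foldl
        (fun r tier => r.insert tier (PySem.List.slice (r.getD tier []) none (some 5)))
        (opps.foldl (fun r opp =>
          if r.contains (pvEffTier opp) then r.modify (pvEffTier opp) [] (fun xs => xs ++ [opp]) else r)
          (PySem.Dict.mk [("Platinum", []), ("Gold", []), ("Silver", [])]))).items) =
    get_top_opportunities_by_tier_py_alt opps
  rw [pvLoopA]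
  simp [get_top_opportunities_by_tier_py_alt, PySem.Dict.keys,
        PySem.Dict.insert, PySem.Dict.getD, PySem.Dict.get?]
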